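-- pv_equiv track=rewrite | github.com/jinxx1/NewPythonCode | python_github/Python_script/rexTime.py | findstrDifference
-- ===== SOURCE A (Python) =====
-- def findstrDifference(word):
-- 	try:
-- 		a = filter(lambda ch: ch in '0123456789.', str(word))
-- 		stra = ''.join([x for x in a])
-- 	except:
-- 		stra = ''
--
-- 	dic = dict()
-- 	for n in stra:
-- 		dic[n] = dic.get(n, 0) + 1
-- 	for n in word:
-- 		if n in dic:
-- 			dic[n] = dic.get(n, 0) - 1
-- 			if dic[n] == 0:
-- 				del dic[n]
-- 		else:
-- 			return n
-- ===== SOURCE B (Python) =====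
-- def findstrDifference(word):
--     # Simpler: single pass, test each character directly against the allowed set.
--     for n in word:
--         if n not in '0123456789.':
--             return n
--     return None
-- ===== Notes on version B (the rewrite author's own statement) =====
-- stated objective: simpler
-- what changed: B drops A's whole preprocessing phase (filtering the word into a digits-and-dot string, building a count dict, then decrementing and deleting entries while scanning) and instead does one direct pass testing each character for being a digit or dot.
import Mathlib
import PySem

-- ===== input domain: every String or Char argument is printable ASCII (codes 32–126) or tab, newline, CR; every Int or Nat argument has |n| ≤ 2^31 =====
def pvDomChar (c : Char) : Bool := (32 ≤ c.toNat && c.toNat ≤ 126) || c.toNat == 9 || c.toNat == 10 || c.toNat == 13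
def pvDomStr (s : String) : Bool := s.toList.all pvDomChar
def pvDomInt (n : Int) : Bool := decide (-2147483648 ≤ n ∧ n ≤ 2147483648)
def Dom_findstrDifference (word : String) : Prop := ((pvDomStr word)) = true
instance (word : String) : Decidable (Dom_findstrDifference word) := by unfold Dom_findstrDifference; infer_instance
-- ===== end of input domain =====

-- B replaces A's filter+counter+consuming-scan with one direct membership pass (simpler); return value only.

-- ===== PORT A =====
-- the second 'for n in word' loop of A, with its dict bookkeeping
def pvLoopA (dic : PySem.Dict Char Int) : List Char → Option String
  | [] => none
  | n :: rest =>
    if dic.contains n then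
      let d := dic.insert n (dic.getD n 0 - 1)
      if d.getD n 0 = 0 then pvLoopA (d.erase n) rest
      else pvLoopA d rest
    else some (String.ofList [n])

def findstrDifference (word : String) : Option String :=
  -- str(word) = word; filter + ''.join(...) over it
  let stra : List Char := word.toList.filter (fun ch => ch ∈ "0123456789.".toList)
  -- for n in stra: dic[n] = dic.get(n, 0) + 1
  let dic : PySem.Dict Char Int :=
    stra.foldl (fun d n => d.insert n (d.getD n 0 + 1)) PySem.Dict.empty
  pvLoopA dic word.toList

-- ===== PORT B =====
def pvLoopB : List Char → Option String
  | [] => none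
  | n :: rest => if n ∈ "0123456789.".toList then pvLoopB rest else some (String.ofList [n])

def findstrDifference_alt (word : String) : Option String :=
  pvLoopB word.toList

-- ===== PRECONDITION & SPEC =====
def Spec_findstrDifference (word : String) (out : Option String) : Prop := out = findstrDifference_alt word
instance (word : String) (out : Option String) : Decidable (Spec_findstrDifference word out) := by unfold Spec_findstrDifference; infer_instance

-- ===== CLAIM (what is proved, stated in full; the proofs are below) =====
def Claim_equal_findstrDifference : Prop := ∀ (word : String), Dom_findstrDifference word → Spec_findstrDifference word (findstrDifference word)

-- ===== LEMMAS AND PROOFS =====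

theorem pv_find?_filter_ne (t : List (Char × Int)) (k k' : Char) (hk : k' ≠ k) :
    List.find? (fun p => p.1 == k') (t.filter (fun p => !p.1 == k))
      = List.find? (fun p => p.1 == k') t := by
  induction t with
  | nil => rfl
  | cons p t ih =>
    by_cases hp : p.1 = k
    · have hkk : (k == k') = false := by
        simp; exact fun h => hk h.symm
      simp [List.filter_cons, hp, List.find?_cons, hkk, ih]
    · by_cases hp' : p.1 = k'
      · simp [List.filter_cons, hp, List.find?_cons, hp', hk]
      · simp [List.filter_cons, hp, List.find?_cons, hp', ih, hk]

theorem pv_get?_erase (d : PySem.Dict Char Int) (k k' : Char) :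
    (d.erase k).get? k' = if k' = k then none else d.get? k' := by
  obtain ⟨l⟩ := d
  by_cases hk : k' = k
  · subst hk
    simp [PySem.Dict.erase, PySem.Dict.get?]
  · simp [PySem.Dict.erase, PySem.Dict.get?, pv_find?_filter_ne l k k' hk, hk]

theorem pv_contains_erase (d : PySem.Dict Char Int) (k k' : Char) :
    (d.erase k).contains k' = if k' = k then false else d.contains k' := by
  rw [PySem.Dict.contains_eq_isSome_get?, PySem.Dict.contains_eq_isSome_get?, pv_get?_erase]
  by_cases hk : k' = k <;> simp [hk]

theorem pv_getD_erase (d : PySem.Dict Char Int) (k k' : Char) (d0 : Int) :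
    (d.erase k).getD k' d0 = if k' = k then d0 else d.getD k' d0 := by
  simp only [PySem.Dict.getD, pv_get?_erase]
  by_cases hk : k' = k <;> simp [hk]

-- main invariant: A's scan with a dict holding the digit/dot counts of s equals B's scan
theorem pvLoopA_eq (s : List Char) : ∀ (d : PySem.Dict Char Int),
    (∀ c, d.getD c 0 = ((s.filter (fun ch => ch ∈ "0123456789.".toList)).count c : Int)) →
    (∀ c, d.contains c = decide (c ∈ s.filter (fun ch => ch ∈ "0123456789.".toList))) →
    pvLoopA d s = pvLoopB s := by
  induction s with
  | nil => intro d _ _; rfl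
  | cons n rest ih =>
    intro d h1 h2
    by_cases hn : n ∈ "0123456789.".toList
    · have hfilt : (n :: rest).filter (fun ch => ch ∈ "0123456789.".toList)
          = n :: rest.filter (fun ch => ch ∈ "0123456789.".toList) := by
        rw [List.filter_cons, if_pos (decide_eq_true hn)]
      simp only [hfilt] at h1 h2
      set F := rest.filter (fun ch => ch ∈ "0123456789.".toList) with hF
      have hc : d.contains n = true := by
        rw [h2 n]; exact decide_eq_true (List.mem_cons_self ..)
      have hdn : d.getD n 0 = (F.count n : Int) + 1 := by
        rw [h1 n, List.count_cons]; simp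
      rw [pvLoopA, pvLoopB, if_pos hc, if_pos hn]
      by_cases h0 : F.count n = 0
      · rw [if_pos]
        · apply ih
          · intro c
            rw [pv_getD_erase]
            by_cases hcn : c = n
            · rw [if_pos hcn, hcn, h0]; simp
            · rw [if_neg hcn, PySem.Dict.getD_insert, if_neg hcn, h1 c, List.count_cons]
              have hne : (n == c) = false := by
                simp; exact fun h => hcn h.symm
              simp [hne]
          · intro c
            rw [pv_contains_erase]
            by_cases hcn : c = n
            · rw [if_pos hcn, hcn]
              have : n ∉ F := List.count_eq_zero.mp h0
              simp [this]
            · rw [if_neg hcn, PySem.Dict.contains_insert, h2 c]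
              have hbeq : (c == n) = false := by
                simp [hcn]
              rw [hbeq]
              simp [List.mem_cons, hcn]
        · rw [PySem.Dict.getD_insert, if_pos rfl, hdn, h0]; simp
      · rw [if_neg]
        · apply ih
          · intro c
            rw [PySem.Dict.getD_insert]
            by_cases hcn : c = n
            · rw [if_pos hcn, hcn, hdn]; simp
            · rw [if_neg hcn, h1 c, List.count_cons]
              have hne : (n == c) = false := by
                simp; exact fun h => hcn h.symm
              simp [hne]
          · intro c
            rw [PySem.Dict.contains_insert, h2 c]
            by_cases hcn : c = n
            · have hmF : n ∈ F := List.count_pos_iff.mp (Nat.pos_of_ne_zero h0)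
              rw [hcn]
              simp [hmF]
            · have hbeq : (c == n) = false := by
                simp [hcn]
              rw [hbeq]
              simp [List.mem_cons, hcn]
        · rw [PySem.Dict.getD_insert, if_pos rfl, hdn]
          intro h
          apply h0
          omega
    · have hnot : decide (n ∈ (n :: rest).filter (fun ch => ch ∈ "0123456789.".toList)) = false := by
        rw [decide_eq_false_iff_not]
        intro h
        exact hn (of_decide_eq_true (List.mem_filter.mp h).2)
      rw [pvLoopA, pvLoopB, h2 n, hnot, if_neg Bool.false_ne_true, if_neg hn]

-- ===== VERDICT (by name: the statement is the Claim_ definition above) =====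
theorem findstrDifference_spec : Claim_equal_findstrDifference := by
  intro word _
  unfold Spec_findstrDifference findstrDifference findstrDifference_alt
  apply pvLoopA_eq
  · intro c
    rw [PySem.Dict.getD_foldl_insert_add_one]
    simp
  · intro c
    rw [PySem.Dict.contains_eq_decide_mem_keys, PySem.Dict.keys_foldl_insert,
      PySem.Dict.keys_empty, PySem.Set.update_nil_left]
    simp [PySem.Set.mem_ofList]
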